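-- pv_equiv track=rewrite | github.com/soburi/zephyr | doc/tools/validate_abnf.py | join_rule_lines
-- ===== SOURCE A (Python) =====
-- from typing import Iterable, List, Optional, Sequence, Tuple
--
-- class ABNFError(RuntimeError):
--     """Raised when a syntax error is encountered in the grammar."""
--
--     def __init__(self, message: str, *, line: int, column: int, rule: Optional[str]):
--         super().__init__(message)
--         self.line = line
--         self.column = column
--         self.rule = rule
--
--     def __str__(self) -> str:  # pragma: no cover - human readable error
--         location = f"line {self.line}, column {self.column}"
--         if self.rule:
--             location += f" (in rule '{self.rule}')"
--         return f"{location}: {super().__str__()}"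
--
-- def join_rule_lines(cleaned_lines: Sequence[Tuple[str, int]]) -> List[Tuple[str, int]]:
--     rules: List[Tuple[str, int]] = []
--     current_line = ""
--     start_number = 0
--     for text, line_number in cleaned_lines:
--         if text and not text[0].isspace():
--             if current_line:
--                 rules.append((current_line, start_number))
--             current_line = text.strip()
--             start_number = line_number
--         else:
--             if not current_line:
--                 raise ABNFError(
--                     "continuation line encountered without preceding rule",
--                     line=line_number,
--                     column=1,
--                     rule=None,
--                 )
--             current_line += " " + text.strip()
--     if current_line:
--         rules.append((current_line, start_number))
--     return rules
-- ===== SOURCE B (Python) =====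
-- from typing import List, Optional, Sequence, Tuple
--
--
-- class ABNFError(RuntimeError):
--     """Raised when a syntax error is encountered in the grammar."""
--
--     def __init__(self, message: str, *, line: int, column: int, rule: Optional[str]):
--         super().__init__(message)
--         self.line = line
--         self.column = column
--         self.rule = rule
--
--
-- def _is_continuation(text: str) -> bool:
--     return (not text) or text[0].isspace()
--
--
-- def join_rule_lines(cleaned_lines: Sequence[Tuple[str, int]]) -> List[Tuple[str, int]]:
--     lines = list(cleaned_lines)
--     if lines and _is_continuation(lines[0][0]):
--         raise ABNFError(
--             "continuation line encountered without preceding rule",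
--             line=lines[0][1],
--             column=1,
--             rule=None,
--         )
--     out: List[Tuple[str, int]] = []
--     i = 0
--     n = len(lines)
--     while i < n:
--         j = i + 1
--         while j < n and _is_continuation(lines[j][0]):
--             j += 1
--         out.append((" ".join(t.strip() for t, _ in lines[i:j]), lines[i][1]))
--         i = j
--     return out
-- ===== Notes on version B (the rewrite author's own statement) =====
-- stated objective: alternative
-- what changed: A threads a current_line/start_number accumulator through one pass and flushes on each new rule start; B instead groups the input block-wise (each rule line plus its following continuation lines, found by an inner scan) and joins each block's stripped texts in one step.
import Mathlib
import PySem

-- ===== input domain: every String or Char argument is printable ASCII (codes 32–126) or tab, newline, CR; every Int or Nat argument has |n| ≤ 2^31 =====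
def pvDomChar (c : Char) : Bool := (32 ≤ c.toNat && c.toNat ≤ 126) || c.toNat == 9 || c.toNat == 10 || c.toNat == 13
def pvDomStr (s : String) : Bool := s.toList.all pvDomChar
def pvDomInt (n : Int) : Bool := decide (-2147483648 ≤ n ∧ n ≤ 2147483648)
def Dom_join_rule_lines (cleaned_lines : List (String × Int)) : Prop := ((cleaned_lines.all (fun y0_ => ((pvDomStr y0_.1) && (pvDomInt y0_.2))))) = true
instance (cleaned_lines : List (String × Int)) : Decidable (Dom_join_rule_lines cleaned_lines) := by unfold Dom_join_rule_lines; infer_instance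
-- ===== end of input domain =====

-- B replaces A's single accumulator loop (current_line/start_number threaded through a fold)
-- by an outer loop that scans each rule's continuation block as a whole and joins it in one step
-- (objective: alternative decomposition, same cost). Equivalence is about the return value;
-- where the Python raises ABNFError (first line a continuation) is excluded by Pre_.

-- ===== PORT A =====
-- `text and not text[0].isspace()` — true iff the line starts a new rule
def pvIsStart (t : String) : Bool :=
  match t.toList with
  | [] => false
  | c :: _ => !PySem.Chars.isspace c

-- loop body of A: state = (rules, current_line, start_number)
def pvStepA (st : List (String × Int) × String × Int) (p : String × Int) :
    List (String × Int) × String × Int :=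
  if pvIsStart p.1 then
    ((if st.2.1 ≠ "" then st.1 ++ [(st.2.1, st.2.2)] else st.1), PySem.Str.strip p.1, p.2)
  else if st.2.1 = "" then st   -- Python raises ABNFError here; such inputs are outside Pre_
  else (st.1, st.2.1 ++ " " ++ PySem.Str.strip p.1, st.2.2)

def join_rule_lines (cleaned_lines : List (String × Int)) : List (String × Int) :=
  let st := cleaned_lines.foldl pvStepA ([], "", 0)
  if st.2.1 ≠ "" then st.1 ++ [(st.2.1, st.2.2)] else st.1

-- ===== PORT B =====
-- Source B's _is_continuation: `(not text) or text[0].isspace()`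
def pvIsCont (t : String) : Bool :=
  match t.toList with
  | [] => true
  | c :: _ => PySem.Chars.isspace c

-- Source B's outer while loop: the inner `while j < n and …` scan is the takeWhile/dropWhile split
def pvGroups : List (String × Int) → List (String × Int)
  | [] => []
  | p :: rest =>
      let cont := rest.takeWhile (fun q => pvIsCont q.1)
      let rest' := rest.dropWhile (fun q => pvIsCont q.1)
      (PySem.Str.join " " ((p :: cont).map (fun q => PySem.Str.strip q.1)), p.2) :: pvGroups rest'
  termination_by ls => ls.length
  decreasing_by
    have h := List.length_dropWhile_le (fun q => pvIsCont q.1) rest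
    simp only [List.length_cons]; omega

def join_rule_lines_alt (cleaned_lines : List (String × Int)) : List (String × Int) :=
  match cleaned_lines with
  | [] => []
  | p :: _ =>
      if pvIsCont p.1 then []   -- Python raises ABNFError here; such inputs are outside Pre_
      else pvGroups cleaned_lines

-- ===== PRECONDITION & SPEC =====
-- Pre_ excludes exactly the inputs on which A raises ABNFError: a non-empty input whose first
-- line is a continuation line (empty or starting with whitespace).
def Pre_join_rule_lines (cleaned_lines : List (String × Int)) : Prop :=
  ∀ p ∈ cleaned_lines.take 1, pvIsStart p.1 = true
instance (cleaned_lines : List (String × Int)) : Decidable (Pre_join_rule_lines cleaned_lines) := by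
  unfold Pre_join_rule_lines; infer_instance

def pvWitness_join_rule_lines : (List (String × Int)) :=
  [("a = b /", 1), ("    c", 2), ("", 3), ("d = e", 5)]

def Spec_join_rule_lines (cleaned_lines : List (String × Int)) (out : List (String × Int)) : Prop := out = join_rule_lines_alt cleaned_lines
instance (cleaned_lines : List (String × Int)) (out : List (String × Int)) : Decidable (Spec_join_rule_lines cleaned_lines out) := by unfold Spec_join_rule_lines; infer_instance

-- ===== CLAIM (what is proved, stated in full; the proofs are below) =====
def Claim_equal_join_rule_lines : Prop := ∀ (cleaned_lines : List (String × Int)), Dom_join_rule_lines cleaned_lines → Pre_join_rule_lines cleaned_lines → Spec_join_rule_lines cleaned_lines (join_rule_lines cleaned_lines)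

-- ===== LEMMAS AND PROOFS =====

theorem pvIsCont_eq_not_isStart (t : String) : pvIsCont t = !pvIsStart t := by
  unfold pvIsCont pvIsStart
  cases t.toList <;> simp

theorem pv_strip_ne_empty {t : String} (h : pvIsStart t = true) : PySem.Str.strip t ≠ "" := by
  intro he
  have h2 : (PySem.Str.strip t).toList = [] := by rw [he]; rfl
  rw [PySem.Str.toList_strip] at h2
  unfold pvIsStart at h
  rcases hl : t.toList with _ | ⟨c, cs⟩
  · rw [hl] at h; simp at h
  · rw [hl] at h h2
    simp only [Bool.not_eq_true'] at h
    unfold PySem.Chars.strip PySem.Chars.lstrip PySem.Chars.rstrip at h2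
    rw [List.dropWhile_cons_of_neg (by simp [h])] at h2
    simp only [List.reverse_eq_nil_iff, List.dropWhile_eq_nil_iff] at h2
    have := h2 c (by simp)
    simp [h] at this

theorem pv_append_ne_empty (a b : String) : a ++ " " ++ b ≠ "" := by
  intro he
  have := congrArg String.toList he
  simp [String.toList_append] at this

theorem pv_join_cons_cons (x y : String) (ys : List String) :
    PySem.Str.join " " (x :: y :: ys) = PySem.Str.join " " ((x ++ " " ++ y) :: ys) := by
  apply String.toList_inj.mp
  cases ys with
  | nil =>
      simp only [PySem.Str.toList_join, List.map]
      rw [PySem.Chars.join_cons_cons, PySem.Chars.join_singleton]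
      simp [String.toList_append]
  | cons z zs =>
      simp only [PySem.Str.toList_join, List.map, PySem.Chars.join_cons_cons,
        String.toList_append]
      simp [List.append_assoc]

theorem pv_join_eq_foldl (parts : List String) : ∀ (x : String),
    PySem.Str.join " " (x :: parts) = parts.foldl (fun s y => s ++ " " ++ y) x := by
  induction parts with
  | nil =>
      intro x
      apply String.toList_inj.mp
      simp [PySem.Str.toList_join, PySem.Chars.join_singleton]
  | cons y ys ih =>
      intro x
      rw [pv_join_cons_cons, List.foldl_cons]
      exact ih (x ++ " " ++ y)

theorem pvGroups_cons (p : String × Int) (rest : List (String × Int)) :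
    pvGroups (p :: rest) =
      ((rest.takeWhile (fun q => pvIsCont q.1)).foldl
          (fun s q => s ++ " " ++ PySem.Str.strip q.1) (PySem.Str.strip p.1), p.2)
        :: pvGroups (rest.dropWhile (fun q => pvIsCont q.1)) := by
  rw [pvGroups]
  simp only [List.map_cons]
  rw [pv_join_eq_foldl, List.foldl_map]

theorem pv_keyA : ∀ (ls : List (String × Int)) (rules : List (String × Int)) (cur : String)
    (start : Int), cur ≠ "" →
    (let st := ls.foldl pvStepA (rules, cur, start)
     if st.2.1 ≠ "" then st.1 ++ [(st.2.1, st.2.2)] else st.1)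
      = rules ++
        ((ls.takeWhile (fun q => pvIsCont q.1)).foldl
            (fun s q => s ++ " " ++ PySem.Str.strip q.1) cur, start)
          :: pvGroups (ls.dropWhile (fun q => pvIsCont q.1)) := by
  intro ls
  induction ls with
  | nil =>
      intro rules cur start hcur
      simp [pvGroups, hcur]
  | cons p rest ih =>
      intro rules cur start hcur
      by_cases hp : pvIsStart p.1 = true
      · have hc : pvIsCont p.1 = false := by rw [pvIsCont_eq_not_isStart, hp]; rfl
        simp only [List.foldl_cons, pvStepA, hp, if_pos hcur, if_true]
        rw [ih (rules ++ [(cur, start)]) (PySem.Str.strip p.1) p.2 (pv_strip_ne_empty hp)]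
        rw [List.takeWhile_cons_of_neg (by simp [hc]), List.dropWhile_cons_of_neg (by simp [hc])]
        rw [pvGroups_cons]
        simp
      · have hp' : pvIsStart p.1 = false := by simpa using hp
        have hc : pvIsCont p.1 = true := by rw [pvIsCont_eq_not_isStart, hp']; rfl
        simp only [List.foldl_cons, pvStepA, hp', Bool.false_eq_true, if_false, if_neg hcur]
        rw [ih rules (cur ++ " " ++ PySem.Str.strip p.1) start (pv_append_ne_empty _ _)]
        rw [List.takeWhile_cons_of_pos (by simp [hc]), List.dropWhile_cons_of_pos (by simp [hc])]
        simp

-- ===== VERDICT (by name: the statement is the Claim_ definition above) =====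
theorem join_rule_lines_spec : Claim_equal_join_rule_lines := by
  intro cleaned_lines _hdom hpre
  unfold Spec_join_rule_lines
  cases cleaned_lines with
  | nil => rfl
  | cons p rest =>
      have hp : pvIsStart p.1 = true := hpre p (by simp)
      have hc : pvIsCont p.1 = false := by rw [pvIsCont_eq_not_isStart, hp]; rfl
      unfold join_rule_lines join_rule_lines_alt
      simp only [List.foldl_cons, pvStepA, hp, if_true, ne_eq, not_true_eq_false, if_false,
        hc, Bool.false_eq_true]
      rw [pv_keyA rest [] (PySem.Str.strip p.1) p.2 (pv_strip_ne_empty hp)]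
      rw [pvGroups_cons]
      simp
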